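-- pv_equiv track=rewrite | github.com/Gyumin5/MoneyFlow | strategies/cap_defend/research/iter_refine.py | _keep_band
-- ===== SOURCE A (Python) =====
-- def _keep_band(vs_sorted: list, peaks: list, band: int) -> list:
--     """peak 인덱스 주변 ±band 이웃 포함, 중복 제거."""
--     idx_of = {v: i for i, v in enumerate(vs_sorted)}
--     keep_idx = set()
--     for p in peaks:
--         if p not in idx_of:
--             continue
--         i = idx_of[p]
--         for j in range(max(0, i - band), min(len(vs_sorted), i + band + 1)):
--             keep_idx.add(j)
--     return [vs_sorted[i] for i in sorted(keep_idx)]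
-- ===== SOURCE B (Python) =====
-- def _keep_band(vs_sorted: list, peaks: list, band: int) -> list:
--     """Difference-array sweep: mark each peak's band as +1/-1 events, then one
--     prefix-sum pass over the indices collects covered values in order."""
--     n = len(vs_sorted)
--     idx_of = {v: i for i, v in enumerate(vs_sorted)}
--     delta = [0] * (n + 1)
--     for p in peaks:
--         if p not in idx_of:
--             continue
--         i = idx_of[p]
--         lo = max(0, i - band)
--         hi = min(n, i + band + 1)
--         if lo < hi:
--             delta[lo] += 1
--             delta[hi] -= 1
--     out = []
--     cover = 0
--     for j in range(n):
--         cover += delta[j]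
--         if cover > 0:
--             out.append(vs_sorted[j])
--     return out
-- ===== Notes on version B (the rewrite author's own statement) =====
-- stated objective: faster
-- what changed: B replaces A's per-peak enumeration of every index in the band into a set plus a final sort by a difference-array of +1/-1 events and a single prefix-sum sweep over the indices, which emits the covered values already in order.
import Mathlib
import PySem

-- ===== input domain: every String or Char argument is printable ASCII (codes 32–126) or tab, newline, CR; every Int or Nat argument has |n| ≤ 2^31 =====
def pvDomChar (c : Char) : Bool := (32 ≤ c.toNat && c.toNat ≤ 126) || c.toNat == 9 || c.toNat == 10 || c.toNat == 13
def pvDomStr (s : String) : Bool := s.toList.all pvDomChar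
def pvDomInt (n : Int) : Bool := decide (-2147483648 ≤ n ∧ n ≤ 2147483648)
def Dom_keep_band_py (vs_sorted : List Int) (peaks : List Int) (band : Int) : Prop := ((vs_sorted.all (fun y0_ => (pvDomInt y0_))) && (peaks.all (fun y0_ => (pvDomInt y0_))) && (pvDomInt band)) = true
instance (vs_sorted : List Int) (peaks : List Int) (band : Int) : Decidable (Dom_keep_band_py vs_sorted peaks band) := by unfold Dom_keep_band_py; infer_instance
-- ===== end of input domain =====

-- B replaces A's per-peak enumeration of every banded index into a set plus a final sort
-- by a difference-array sweep (+1/-1 events per peak, one prefix-sum pass in index order);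
-- objective: faster (O(n + peaks) vs O(n + peaks*band), and no sort).

-- ===== PORT A =====
-- shared helper: the dict comprehension {v: i for i, v in enumerate(vs_sorted)} (both Pythons build it)
def pvIdxOf (vs_sorted : List Int) : PySem.Dict Int Int :=
  (PySem.List.enumerate vs_sorted).foldl (fun d iv => d.insert iv.2 iv.1) PySem.Dict.empty

def keep_band_py (vs_sorted : List Int) (peaks : List Int) (band : Int) : List Int :=
  let idx_of := pvIdxOf vs_sorted
  let keep_idx : PySem.Set Int :=
    peaks.foldl (fun s p =>
      match idx_of.get? p with
      | none => s
      | some i =>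
          (PySem.List.pyRange (max 0 (i - band)) (min (vs_sorted.length : Int) (i + band + 1)) 1).foldl
            PySem.Set.add s)
      PySem.Set.empty
  (PySem.List.sorted keep_idx (fun x => x) false).map (fun i => PySem.List.pyGetD vs_sorted i 0)

-- ===== PORT B =====
def keep_band_py_alt (vs_sorted : List Int) (peaks : List Int) (band : Int) : List Int :=
  let n : Int := (vs_sorted.length : Int)
  let idx_of := pvIdxOf vs_sorted
  let delta0 : List Int := List.replicate (n + 1).toNat 0
  let delta := peaks.foldl (fun d p =>
      match idx_of.get? p with
      | none => d
      | some i =>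
          let lo := max 0 (i - band)
          let hi := min n (i + band + 1)
          if lo < hi then
            let d1 := PySem.List.pySetD d lo (PySem.List.pyGetD d lo 0 + 1)
            PySem.List.pySetD d1 hi (PySem.List.pyGetD d1 hi 0 - 1)
          else d)
    delta0
  let res := (PySem.List.pyRange 0 n 1).foldl (fun (st : Int × List Int) j =>
      let cover := st.1 + PySem.List.pyGetD delta j 0
      (cover, if 0 < cover then st.2 ++ [PySem.List.pyGetD vs_sorted j 0] else st.2))
    ((0 : Int), ([] : List Int))
  res.2

-- ===== PRECONDITION & SPEC =====
def Spec_keep_band_py (vs_sorted : List Int) (peaks : List Int) (band : Int) (out : List Int) : Prop := out = keep_band_py_alt vs_sorted peaks band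
instance (vs_sorted : List Int) (peaks : List Int) (band : Int) (out : List Int) : Decidable (Spec_keep_band_py vs_sorted peaks band out) := by unfold Spec_keep_band_py; infer_instance

-- ===== CLAIM (what is proved, stated in full; the proofs are below) =====
def Claim_equal_keep_band_py : Prop := ∀ (vs_sorted : List Int) (peaks : List Int) (band : Int), Dom_keep_band_py vs_sorted peaks band → Spec_keep_band_py vs_sorted peaks band (keep_band_py vs_sorted peaks band)

-- ===== LEMMAS AND PROOFS =====

-- does peak p cover index j? (the common predicate both programs realise)
def pvCovers (idx : PySem.Dict Int Int) (n band j p : Int) : Bool :=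
  match idx.get? p with
  | some i => decide (max 0 (i - band) ≤ j ∧ j < min n (i + band + 1))
  | none => false

-- the canonical output indices: covered indices in increasing order
def pvM (idx : PySem.Dict Int Int) (n band : Int) (peaks : List Int) : List Int :=
  (PySem.List.pyRange 0 n 1).filter (fun j => peaks.any (pvCovers idx n band j))

lemma pvCovers_bounds {idx : PySem.Dict Int Int} {n band j p : Int}
    (h : pvCovers idx n band j p = true) : 0 ≤ j ∧ j < n := by
  unfold pvCovers at h
  cases hg : idx.get? p with
  | none => simp [hg] at h
  | some i => simp [hg] at h; omega

-- ---- A side ----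

lemma mem_foldl_set_add (l : List Int) (s : PySem.Set Int) (j : Int) :
    j ∈ l.foldl PySem.Set.add s ↔ j ∈ l ∨ j ∈ s := by
  induction l generalizing s with
  | nil => simp
  | cons a t ih =>
      simp only [List.foldl_cons, ih, PySem.Set.mem_add, List.mem_cons]
      tauto

lemma nodup_foldl_set_add (l : List Int) (s : PySem.Set Int) (h : s.Nodup) :
    (l.foldl PySem.Set.add s).Nodup := by
  induction l generalizing s with
  | nil => exact h
  | cons a t ih => exact ih _ (PySem.Set.nodup_add s a h)

def pvStepA (idx : PySem.Dict Int Int) (n band : Int) : PySem.Set Int → Int → PySem.Set Int :=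
  fun s p =>
    match idx.get? p with
    | none => s
    | some i => (PySem.List.pyRange (max 0 (i - band)) (min n (i + band + 1)) 1).foldl PySem.Set.add s

lemma mem_foldl_stepA (idx : PySem.Dict Int Int) (n band : Int) (peaks : List Int)
    (s : PySem.Set Int) (j : Int) :
    j ∈ peaks.foldl (pvStepA idx n band) s ↔ peaks.any (pvCovers idx n band j) = true ∨ j ∈ s := by
  induction peaks generalizing s with
  | nil => simp
  | cons p t ih =>
      simp only [List.foldl_cons, ih, List.any_cons, Bool.or_eq_true]
      unfold pvStepA pvCovers
      cases hg : idx.get? p with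
      | none => simp
      | some i =>
          simp only [mem_foldl_set_add, PySem.List.mem_pyRange_one, decide_eq_true_eq]
          tauto

lemma nodup_foldl_stepA (idx : PySem.Dict Int Int) (n band : Int) (peaks : List Int)
    (s : PySem.Set Int) (h : s.Nodup) :
    (peaks.foldl (pvStepA idx n band) s).Nodup := by
  induction peaks generalizing s with
  | nil => exact h
  | cons p t ih =>
      apply ih
      unfold pvStepA
      cases idx.get? p with
      | none => exact h
      | some i => exact nodup_foldl_set_add _ _ h

lemma keepA_eq_map (vs_sorted peaks : List Int) (band : Int) :
    keep_band_py vs_sorted peaks band =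
      (pvM (pvIdxOf vs_sorted) (vs_sorted.length : Int) band peaks).map
        (fun j => PySem.List.pyGetD vs_sorted j 0) := by
  unfold keep_band_py
  have hfold : ∀ s, peaks.foldl (fun s p =>
      match (pvIdxOf vs_sorted).get? p with
      | none => s
      | some i =>
          (PySem.List.pyRange (max 0 (i - band)) (min (vs_sorted.length : Int) (i + band + 1)) 1).foldl
            PySem.Set.add s) s = peaks.foldl (pvStepA (pvIdxOf vs_sorted) (vs_sorted.length : Int) band) s := by
    intro s; rfl
  simp only [hfold]
  congr 1
  have hnd1 : (pvM (pvIdxOf vs_sorted) (vs_sorted.length : Int) band peaks).Nodup := by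
    unfold pvM
    exact (PySem.List.nodup_pyRange_one 0 _).filter _
  have hnd2 : (peaks.foldl (pvStepA (pvIdxOf vs_sorted) (vs_sorted.length : Int) band)
      PySem.Set.empty).Nodup := nodup_foldl_stepA _ _ _ _ _ List.nodup_nil
  apply PySem.List.sorted_eq_of_perm_of_pairwise_lt
  · rw [List.perm_ext_iff_of_nodup hnd1 hnd2]
    intro j
    rw [mem_foldl_stepA]
    unfold pvM
    simp only [List.mem_filter, PySem.List.mem_pyRange_one]
    constructor
    · rintro ⟨⟨h0, h1⟩, h2⟩; left; exact h2
    · rintro (h | h)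
      · rcases List.any_eq_true.mp h with ⟨p, hp, hc⟩
        exact ⟨pvCovers_bounds hc, h⟩
      · simp [PySem.Set.empty] at h
  · unfold pvM
    exact (PySem.List.pairwise_lt_pyRange_one 0 _).filter _

-- ---- B side ----

lemma sum_take_set (l : List Int) (i k : Nat) (x : Int) (h : i < l.length) :
    ((l.set i x).take k).sum = (l.take k).sum + (if i < k then x - l[i] else 0) := by
  induction l generalizing i k with
  | nil => simp at h
  | cons a t ih =>
      cases k with
      | zero => simp
      | succ k =>
          cases i with
          | zero =>
              simp only [List.set_cons_zero, List.take_succ_cons, List.sum_cons,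
                List.getElem_cons_zero, if_pos (Nat.succ_pos k)]
              ring
          | succ i =>
              simp only [List.set_cons_succ, List.take_succ_cons, List.sum_cons,
                List.getElem_cons_succ]
              rw [ih i k (by simpa using h)]
              by_cases hik : i < k
              · rw [if_pos hik, if_pos (by omega : i + 1 < k + 1)]; ring
              · rw [if_neg hik, if_neg (by omega : ¬ i + 1 < k + 1)]; ring

def pvStepB (idx : PySem.Dict Int Int) (n band : Int) : List Int → Int → List Int :=
  fun d p =>
    match idx.get? p with
    | none => d
    | some i =>
        let lo := max 0 (i - band)
        let hi := min n (i + band + 1)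
        if lo < hi then
          let d1 := PySem.List.pySetD d lo (PySem.List.pyGetD d lo 0 + 1)
          PySem.List.pySetD d1 hi (PySem.List.pyGetD d1 hi 0 - 1)
        else d

lemma stepB_length (idx : PySem.Dict Int Int) (n band : Int) (d : List Int) (p : Int) :
    (pvStepB idx n band d p).length = d.length := by
  unfold pvStepB
  cases idx.get? p with
  | none => rfl
  | some i =>
      simp only []
      split
      · simp [PySem.List.length_pySetD]
      · rfl

lemma stepB_sum_take (idx : PySem.Dict Int Int) (n band : Int) (d : List Int) (p j : Int)
    (hd : d.length = (n + 1).toNat) (hj0 : 0 ≤ j) (hjn : j < n) :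
    ((pvStepB idx n band d p).take (j.toNat + 1)).sum =
      (d.take (j.toNat + 1)).sum + (if pvCovers idx n band j p then 1 else 0) := by
  unfold pvStepB pvCovers
  cases idx.get? p with
  | none => simp
  | some i =>
      simp only [decide_eq_true_eq]
      set lo := max 0 (i - band) with hlo
      set hi := min n (i + band + 1) with hhi
      by_cases hlt : lo < hi
      · have h0lo : 0 ≤ lo := le_max_left _ _
        have hhin : hi ≤ n := min_le_left _ _
        have hlolen : lo.toNat < d.length := by omega
        have hhilen : hi.toNat < d.length := by omega
        rw [if_pos hlt]
        rw [PySem.List.pySetD_of_nonneg _ _ h0lo,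
            PySem.List.pySetD_of_nonneg _ _ (by omega : (0:Int) ≤ hi)]
        rw [PySem.List.pyGetD_eq_getElem _ _ h0lo (by omega),
            PySem.List.pyGetD_eq_getElem _ _ (by omega : (0:Int) ≤ hi)
              (by simp only [List.length_set]; omega)]
        rw [sum_take_set _ _ _ _ (by simpa using hhilen),
            sum_take_set _ _ _ _ hlolen]
        have c1 : lo.toNat < j.toNat + 1 ↔ lo ≤ j := by omega
        have c2 : hi.toNat < j.toNat + 1 ↔ hi ≤ j := by omega
        by_cases h1 : lo ≤ j
        · by_cases h2 : j < hi
          · rw [if_pos (c1.mpr h1), if_neg (by omega : ¬ hi.toNat < j.toNat + 1),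
                if_pos ⟨h1, h2⟩]
            ring
          · rw [if_pos (c1.mpr h1), if_pos (c2.mpr (by omega)), if_neg (by tauto)]
            ring
        · rw [if_neg (by omega : ¬ lo.toNat < j.toNat + 1),
              if_neg (by omega : ¬ hi.toNat < j.toNat + 1), if_neg (by tauto)]
          ring
      · rw [if_neg hlt, if_neg (by omega : ¬ (lo ≤ j ∧ j < hi))]
        ring

lemma foldl_stepB_sum_take (idx : PySem.Dict Int Int) (n band : Int) (peaks : List Int)
    (d : List Int) (j : Int)
    (hd : d.length = (n + 1).toNat) (hj0 : 0 ≤ j) (hjn : j < n) :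
    ((peaks.foldl (pvStepB idx n band) d).take (j.toNat + 1)).sum =
      (d.take (j.toNat + 1)).sum + (peaks.countP (pvCovers idx n band j) : Int) := by
  induction peaks generalizing d with
  | nil => simp
  | cons p t ih =>
      simp only [List.foldl_cons]
      rw [ih _ (by rw [stepB_length]; exact hd)]
      rw [stepB_sum_take idx n band d p j hd hj0 hjn]
      rw [List.countP_cons]
      by_cases h : pvCovers idx n band j p
      · simp [h]; ring
      · simp [h]

lemma foldl_stepB_length (idx : PySem.Dict Int Int) (n band : Int) (peaks : List Int)
    (d : List Int) : (peaks.foldl (pvStepB idx n band) d).length = d.length := by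
  induction peaks generalizing d with
  | nil => rfl
  | cons p t ih => rw [List.foldl_cons, ih, stepB_length]

-- the sweep loop invariant
lemma sweep_invariant (delta vs_sorted : List Int) (m : Nat)
    (pred : Int → Bool)
    (hp : ∀ j : Int, 0 ≤ j → j < (m : Int) →
      (pred j = true ↔ 0 < (delta.take (j.toNat + 1)).sum))
    (hm : m ≤ delta.length) :
    (PySem.List.pyRange 0 (m : Int) 1).foldl (fun (st : Int × List Int) j =>
        let cover := st.1 + PySem.List.pyGetD delta j 0
        (cover, if 0 < cover then st.2 ++ [PySem.List.pyGetD vs_sorted j 0] else st.2))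
      ((0 : Int), ([] : List Int)) =
      ((delta.take m).sum,
        ((PySem.List.pyRange 0 (m : Int) 1).filter pred).map
          (fun j => PySem.List.pyGetD vs_sorted j 0)) := by
  induction m with
  | zero => simp [PySem.List.pyRange_one_eq_nil]
  | succ m ih =>
      have hmono : ∀ j : Int, 0 ≤ j → j < (m : Int) →
          (pred j = true ↔ 0 < (delta.take (j.toNat + 1)).sum) := by
        intro j h0 h1; exact hp j h0 (by omega)
      have hcast : ((m + 1 : Nat) : Int) = (m : Int) + 1 := by push_cast; ring
      rw [hcast, PySem.List.pyRange_one_succ_right (by positivity)]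
      rw [List.foldl_append, List.filter_append, List.map_append,
          ih hmono (by omega)]
      have hget : PySem.List.pyGetD delta (m : Int) 0 = delta[m] := by
        have h2 : ((m : Int)).toNat = m := by omega
        rw [PySem.List.pyGetD_eq_getElem _ _ (by positivity) (by exact_mod_cast by omega)]
        congr 1
      have htake : (delta.take (m + 1)).sum = (delta.take m).sum + delta[m] := by
        rw [List.take_add_one, List.getElem?_eq_getElem (by omega : m < delta.length),
          Option.toList_some, List.sum_append, List.sum_cons, List.sum_nil, add_zero]
        rfl
      have hpredm := hp (m : Int) (by positivity) (by push_cast; omega)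
      simp only [List.foldl_cons, List.foldl_nil, List.filter_cons]
      by_cases hc : 0 < (delta.take m).sum + delta[m]
      · have : pred (m : Int) = true := by
          rw [hpredm]; simpa [htake] using hc
        simp [hget, htake, hc, this]
      · have : ¬ pred (m : Int) = true := by
          rw [hpredm]; simpa [htake] using hc
        simp [hget, htake, hc, this]

lemma keepB_eq_map (vs_sorted peaks : List Int) (band : Int) :
    keep_band_py_alt vs_sorted peaks band =
      (pvM (pvIdxOf vs_sorted) (vs_sorted.length : Int) band peaks).map
        (fun j => PySem.List.pyGetD vs_sorted j 0) := by
  unfold keep_band_py_alt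
  set n : Int := (vs_sorted.length : Int) with hn
  set idx := pvIdxOf vs_sorted with hidx
  have hfold : ∀ d, peaks.foldl (fun d p =>
      match idx.get? p with
      | none => d
      | some i =>
          let lo := max 0 (i - band)
          let hi := min n (i + band + 1)
          if lo < hi then
            let d1 := PySem.List.pySetD d lo (PySem.List.pyGetD d lo 0 + 1)
            PySem.List.pySetD d1 hi (PySem.List.pyGetD d1 hi 0 - 1)
          else d) d = peaks.foldl (pvStepB idx n band) d := by
    intro d; rfl
  simp only [hfold]
  set delta := peaks.foldl (pvStepB idx n band) (List.replicate (n + 1).toNat 0) with hdelta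
  have hdlen : delta.length = (n + 1).toNat := by
    rw [hdelta, foldl_stepB_length]; simp
  have hsum : ∀ j : Int, 0 ≤ j → j < n →
      (delta.take (j.toNat + 1)).sum = (peaks.countP (pvCovers idx n band j) : Int) := by
    intro j h0 h1
    rw [hdelta, foldl_stepB_sum_take idx n band peaks _ j (by simp) h0 h1]
    simp [List.take_replicate]
  have hpred : ∀ j : Int, 0 ≤ j → j < ((vs_sorted.length : Nat) : Int) →
      (peaks.any (pvCovers idx n band j) = true ↔ 0 < (delta.take (j.toNat + 1)).sum) := by
    intro j h0 h1
    rw [hsum j h0 (by exact_mod_cast h1)]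
    rw [List.any_eq_true]
    constructor
    · rintro ⟨p, hp, hc⟩
      have : 0 < peaks.countP (pvCovers idx n band j) :=
        List.countP_pos_iff.mpr ⟨p, hp, hc⟩
      exact_mod_cast this
    · intro h
      have : 0 < peaks.countP (pvCovers idx n band j) := by exact_mod_cast h
      exact List.countP_pos_iff.mp this
  have := sweep_invariant delta vs_sorted vs_sorted.length
      (fun j => peaks.any (pvCovers idx n band j)) hpred (by omega)
  rw [show n = ((vs_sorted.length : Nat) : Int) from hn] at *
  rw [this]
  rfl

-- ===== VERDICT (by name: the statement is the Claim_ definition above) =====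
theorem keep_band_py_spec : Claim_equal_keep_band_py := by
  intro vs_sorted peaks band _
  unfold Spec_keep_band_py
  rw [keepA_eq_map, keepB_eq_map]
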